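-- pv_equiv track=rewrite | github.com/Branlondo/Programacion-1 | Parcial 2/calendario.py | generar_calendario
-- ===== SOURCE A (Python) =====
-- def es_bisiesto(anio):
--     """
--     Retorna True si el año es bisiesto.
--     Reglas:
--     - Divisible por 4: bisiesto
--     - EXCEPTO si es divisible por 100: no bisiesto
--     - EXCEPTO si es divisible por 400: bisiesto
--     """
--     return (anio % 4 == 0 and anio % 100 != 0) or (anio % 400 == 0)
--
-- def dias_en_mes(mes, anio):
--     """
--     Retorna el número de días en el mes (1-12).
--     Considera años bisiestos para febrero.
--     Lanza ValueError si el mes es inválido.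
--     """
--     if not 1 <= mes <= 12:
--         raise ValueError("Mes inválido. Debe estar entre 1 y 12.")
--
--     dias_por_mes = {
--         1: 31,
--         2: 29 if es_bisiesto(anio) else 28,
--         3: 31,
--         4: 30,
--         5: 31,
--         6: 30,
--         7: 31,
--         8: 31,
--         9: 30,
--         10: 31,
--         11: 30,
--         12: 31
--     }
--
--     return dias_por_mes[mes]
--
-- def generar_calendario(mes, anio, dia_inicio=0):
--     """
--     Genera una representación string del calendario del mes.
--     dia_inicio: 0=Lunes, 1=Martes, ..., 6=Domingo
--
--     Retorna string con formato:
--     Lu Ma Mi Ju Vi Sa Do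
--      1  2  3  4  5  6  7
--      8  9 10 11 12 13 14
--     ...
--     """
--     encabezado = "Lu Ma Mi Ju Vi Sa Do"
--     calendario = [encabezado]
--
--     dia_inicio = dia_inicio % 7  # Validación silenciosa
--     dias = dias_en_mes(mes, anio)
--
--     # Primera línea con espacios vacíos
--     semana = ["   "] * dia_inicio
--
--     for dia in range(1, dias + 1):
--         semana.append(f"{dia:2}")
--         if len(semana) == 7:
--             calendario.append(" ".join(semana))
--             semana = []
--
--     if semana:
--         calendario.append(" ".join(semana))
--
--     return "\n".join(calendario)
-- ===== SOURCE B (Python) =====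
-- def es_bisiesto(anio):
--     return (anio % 4 == 0 and anio % 100 != 0) or (anio % 400 == 0)
--
-- def generar_calendario(mes, anio, dia_inicio=0):
--     if not 1 <= mes <= 12:
--         raise ValueError("Mes inválido. Debe estar entre 1 y 12.")
--     dias = [31, 29 if es_bisiesto(anio) else 28, 31, 30, 31, 30,
--             31, 31, 30, 31, 30, 31][mes - 1]
--     cells = ["   "] * (dia_inicio % 7) + [f"{dia:2}" for dia in range(1, dias + 1)]
--     rows = ["Lu Ma Mi Ju Vi Sa Do"]
--     for i in range(0, len(cells), 7):
--         rows.append(" ".join(cells[i:i+7]))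
--     return "\n".join(rows)
-- ===== Notes on version B (the rewrite author's own statement) =====
-- stated objective: alternative
-- what changed: B replaces A's incremental flush-the-week-buffer-at-length-7 loop with a two-phase build: a flat list of all cells (placeholders plus formatted days) built first, then sliced into rows of seven; the month length comes from a list indexed by mes instead of a dict.
import Mathlib
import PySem

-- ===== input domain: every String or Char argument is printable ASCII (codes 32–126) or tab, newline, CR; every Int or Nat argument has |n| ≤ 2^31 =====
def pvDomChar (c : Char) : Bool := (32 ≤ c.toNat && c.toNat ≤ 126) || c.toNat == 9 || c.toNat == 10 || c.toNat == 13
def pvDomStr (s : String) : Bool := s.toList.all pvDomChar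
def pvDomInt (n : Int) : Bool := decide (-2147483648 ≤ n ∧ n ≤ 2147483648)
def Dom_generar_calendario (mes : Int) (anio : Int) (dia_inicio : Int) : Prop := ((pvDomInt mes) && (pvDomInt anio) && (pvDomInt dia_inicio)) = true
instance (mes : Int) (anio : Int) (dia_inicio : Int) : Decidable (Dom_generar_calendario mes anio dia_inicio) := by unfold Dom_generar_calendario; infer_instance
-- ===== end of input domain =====

-- B builds the whole cell list first and then chunks it into rows of seven, instead of A's
-- incremental flush-at-seven buffer; objective: alternative decomposition (same cost).

-- ===== PORT A =====
-- es_bisiesto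
def pvEsBisiesto (anio : Int) : Bool :=
  (PySem.Int.mod anio 4 == 0 && !(PySem.Int.mod anio 100 == 0)) || PySem.Int.mod anio 400 == 0

-- the dict dias_por_mes built inside dias_en_mes
def pvDiasPorMes (anio : Int) : PySem.Dict Int Int :=
  (((((((((((PySem.Dict.empty.insert 1 31).insert 2 (if pvEsBisiesto anio then 29 else 28)).insert
    3 31).insert 4 30).insert 5 31).insert 6 30).insert 7 31).insert 8 31).insert
    9 30).insert 10 31).insert 11 30).insert 12 31

-- dias_en_mes; none = the ValueError raise (excluded by Pre_); getD 0 is unreachable: keys 1..12 are all present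
def pvDiasEnMes? (mes : Int) (anio : Int) : Option Int :=
  if 1 ≤ mes ∧ mes ≤ 12 then some (((pvDiasPorMes anio).get? mes).getD 0) else none

-- f"{dia:2}": right-align to width 2 with spaces (exact: str(n) is never empty, so at most one pad space)
def pvFmt2 (n : Int) : String :=
  let cs := PySem.Int.toChars n
  String.ofList (if cs.length < 2 then ' ' :: cs else cs)

-- A's loop body after dia_inicio %= 7 and dias are known
def pvBuildA (d0 : Int) (dias : Int) : String :=
  let encabezado := "Lu Ma Mi Ju Vi Sa Do"
  let calendario : List String := [encabezado]
  let semana : List String := List.replicate d0.toNat "   "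
  let st := (PySem.List.pyRange 1 (dias + 1) 1).foldl
    (fun (st : List String × List String) dia =>
      let semana := st.2 ++ [pvFmt2 dia]
      if semana.length == 7 then (st.1 ++ [PySem.Str.join " " semana], [])
      else (st.1, semana)) (calendario, semana)
  let calendario := if st.2.isEmpty then st.1 else st.1 ++ [PySem.Str.join " " st.2]
  PySem.Str.join "\n" calendario

def generar_calendario (mes : Int) (anio : Int) (dia_inicio : Int) : String :=
  let d0 := PySem.Int.mod dia_inicio 7
  match pvDiasEnMes? mes anio with
  | none => ""          -- Python raises ValueError here; excluded by Pre_
  | some dias => pvBuildA d0 dias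

-- ===== PORT B =====
-- B's two-phase body: flat cell list, then chunk into sevens
def pvBuildB (d0 : Int) (dias : Int) : String :=
  let cells := List.replicate d0.toNat "   " ++ (PySem.List.pyRange 1 (dias + 1) 1).map pvFmt2
  let rows := (PySem.List.pyRange 0 (cells.length : Int) 7).foldl
    (fun rows i => rows ++ [PySem.Str.join " " (PySem.List.slice cells (some i) (some (i + 7)))])
    ["Lu Ma Mi Ju Vi Sa Do"]
  PySem.Str.join "\n" rows

def generar_calendario_alt (mes : Int) (anio : Int) (dia_inicio : Int) : String :=
  if 1 ≤ mes ∧ mes ≤ 12 then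
    -- the list lookup [..][mes-1] always hits inside Pre_, so getD 0 is unreachable
    let dias := (PySem.List.pyGet?
      [31, if pvEsBisiesto anio then 29 else (28 : Int), 31, 30, 31, 30, 31, 31, 30, 31, 30, 31]
      (mes - 1)).getD 0
    pvBuildB (PySem.Int.mod dia_inicio 7) dias
  else ""               -- Python raises ValueError here; excluded by Pre_

-- ===== PRECONDITION & SPEC =====
-- Pre_ excludes exactly the months outside 1..12, on which A raises ValueError.
def Pre_generar_calendario (mes : Int) (anio : Int) (dia_inicio : Int) : Prop := 1 ≤ mes ∧ mes ≤ 12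
instance (mes : Int) (anio : Int) (dia_inicio : Int) : Decidable (Pre_generar_calendario mes anio dia_inicio) := by unfold Pre_generar_calendario; infer_instance
def pvWitness_generar_calendario : Int × Int × Int := (2, 2024, 3)

def Spec_generar_calendario (mes : Int) (anio : Int) (dia_inicio : Int) (out : String) : Prop := out = generar_calendario_alt mes anio dia_inicio
instance (mes : Int) (anio : Int) (dia_inicio : Int) (out : String) : Decidable (Spec_generar_calendario mes anio dia_inicio out) := by unfold Spec_generar_calendario; infer_instance

-- ===== CLAIM (what is proved, stated in full; the proofs are below) =====
def Claim_equal_generar_calendario : Prop := ∀ (mes : Int) (anio : Int) (dia_inicio : Int), Dom_generar_calendario mes anio dia_inicio → Pre_generar_calendario mes anio dia_inicio → Spec_generar_calendario mes anio dia_inicio (generar_calendario mes anio dia_inicio)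

-- ===== LEMMAS AND PROOFS =====

-- the month length as a function of the month and the leap flag (proof-only helper)
def pvMonthLen (mes : Int) (b : Bool) : Int :=
  if mes = 2 then (if b then 29 else 28)
  else if mes = 4 ∨ mes = 6 ∨ mes = 9 ∨ mes = 11 then 30 else 31

theorem pv_diasA (mes anio : Int) (h1 : 1 ≤ mes) (h2 : mes ≤ 12) :
    pvDiasEnMes? mes anio = some (pvMonthLen mes (pvEsBisiesto anio)) := by
  interval_cases mes <;> cases hb : pvEsBisiesto anio <;>
    simp only [pvDiasEnMes?, pvDiasPorMes, pvMonthLen, hb] <;> decide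

theorem pv_diasB (mes anio : Int) (h1 : 1 ≤ mes) (h2 : mes ≤ 12) :
    (PySem.List.pyGet?
      [31, if pvEsBisiesto anio then 29 else (28 : Int), 31, 30, 31, 30, 31, 31, 30, 31, 30, 31]
      (mes - 1)).getD 0 = pvMonthLen mes (pvEsBisiesto anio) := by
  interval_cases mes <;> cases hb : pvEsBisiesto anio <;>
    simp only [pvMonthLen, hb] <;> decide

theorem pv_monthLen_bounds (mes : Int) (b : Bool) :
    28 ≤ pvMonthLen mes b ∧ pvMonthLen mes b ≤ 31 := by
  unfold pvMonthLen; split_ifs <;> omega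

-- the two build phases coincide for every possible offset and month length
set_option maxRecDepth 10000 in
set_option maxHeartbeats 4000000 in
theorem pv_build_eq (d0 n : Int) (h0 : 0 ≤ d0) (h7 : d0 < 7) (hl : 28 ≤ n) (hu : n ≤ 31) :
    pvBuildA d0 n = pvBuildB d0 n := by
  interval_cases d0 <;> interval_cases n <;> decide

-- ===== VERDICT (by name: the statement is the Claim_ definition above) =====
theorem generar_calendario_spec : Claim_equal_generar_calendario := by
  intro mes anio d _ hpre
  obtain ⟨h1, h2⟩ := hpre
  unfold Spec_generar_calendario generar_calendario generar_calendario_alt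
  rw [pv_diasA mes anio h1 h2, if_pos ⟨h1, h2⟩, pv_diasB mes anio h1 h2]
  obtain ⟨hl, hu⟩ := pv_monthLen_bounds mes (pvEsBisiesto anio)
  exact pv_build_eq _ _ (PySem.Int.mod_nonneg d (by norm_num)) (PySem.Int.mod_lt d (by norm_num)) hl hu
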